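-- pv_equiv track=rewrite | github.com/benbuzz790/bots | bots/tools/llast.py | _handle_special_names
-- ===== SOURCE A (Python) =====
-- def _handle_special_names(code: str) -> str:
--     """
--     Handle special Python dunder names.
--     Ensures they are preserved correctly during unparsing.
--     """
--     # Handle special dunder names with specific logic for each
--     replacements = {
--         "**name**": "__name__",
--         "**file**": "__file__",
--         "**doc**": "__doc__",
--         "**package**": "__package__",
--         "**spec**": "__spec__",
--         "**module**": "__module__",
--         "**qualname**": "__qualname__",
--         "**annotations**": "__annotations__",
--         "**all__": "__all__"
--     }
--
--     for pattern, replacement in replacements.items():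
--         code = code.replace(pattern, replacement)
--     return code
-- ===== SOURCE B (Python) =====
-- def _handle_special_names(code: str) -> str:
--     """
--     Handle special Python dunder names.
--     Ensures they are preserved correctly during unparsing.
--     """
--     words = ["name", "file", "doc", "package", "spec", "module",
--              "qualname", "annotations"]
--     replacements = {"**%s**" % w: "__%s__" % w for w in words}
--     replacements["**all__"] = "__all__"
--
--     # single left-to-right scan: at each position emit the replacement of the
--     # first placeholder found there, otherwise the character itself
--     out = []
--     i = 0
--     while i < len(code):
--         for pattern, replacement in replacements.items():
--             if code.startswith(pattern, i):
--                 out.append(replacement)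
--                 i += len(pattern)
--                 break
--         else:
--             out.append(code[i])
--             i += 1
--     return "".join(out)
-- ===== Notes on version B (the rewrite author's own statement) =====
-- stated objective: alternative
-- what changed: Replaces nine sequential whole-string str.replace passes by a single left-to-right scan that at each position emits the replacement of the first matching placeholder; Pre_ excludes strings in which placeholder occurrences overlap or chain (a placeholder's trailing '**' or '*' starting another, or '**all'/'**all_' immediately followed by a placeholder), where A's result is an accident of its pass order.
-- outside the precondition, e.g. on _handle_special_names('**doc**name**'): A returns '**doc__name__', B returns '__doc__name**'; on _handle_special_names('**all**name**'): A returns '__all__name__', B returns '**all__name__'; on _handle_special_names('**name**file**'): A returns '__name__file**', B returns '__name__file**'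
import Mathlib
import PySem

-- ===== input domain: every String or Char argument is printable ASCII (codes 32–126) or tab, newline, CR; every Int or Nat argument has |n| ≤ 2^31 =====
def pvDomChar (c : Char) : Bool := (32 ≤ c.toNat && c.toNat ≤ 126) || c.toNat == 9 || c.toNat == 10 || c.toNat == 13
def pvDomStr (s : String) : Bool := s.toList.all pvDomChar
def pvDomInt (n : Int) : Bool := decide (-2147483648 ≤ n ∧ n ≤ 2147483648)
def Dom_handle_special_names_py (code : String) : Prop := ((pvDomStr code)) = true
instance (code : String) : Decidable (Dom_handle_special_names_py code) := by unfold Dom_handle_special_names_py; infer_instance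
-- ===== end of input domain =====

-- B replaces A's nine sequential whole-string replace passes by a single left-to-right
-- scan emitting the first matching placeholder's replacement (objective: alternative;
-- not claimed faster). Pre_ excludes strings with overlapping/chaining placeholder
-- occurrences, where A's result depends on the accidental order of its passes.


-- ===== PORT A =====
-- the dict literal `replacements`
def pvReplacementsA : PySem.Dict String String :=
  PySem.Dict.ofList
    [ ("**name**", "__name__"),
      ("**file**", "__file__"),
      ("**doc**", "__doc__"),
      ("**package**", "__package__"),
      ("**spec**", "__spec__"),
      ("**module**", "__module__"),
      ("**qualname**", "__qualname__"),
      ("**annotations**", "__annotations__"),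
      ("**all__", "__all__") ]

-- `for pattern, replacement in replacements.items(): code = code.replace(pattern, replacement)`
def handle_special_names_py (code : String) : String :=
  pvReplacementsA.items.foldl (fun c pr => PySem.Str.replace c pr.1 pr.2) code

-- ===== PORT B =====
-- Source B's `words` and its `replacements` dict, in insertion order, as char-list pairs
def pvWords : List String :=
  ["name", "file", "doc", "package", "spec", "module", "qualname", "annotations"]

def pvPairs : List (List Char × List Char) :=
  (pvWords.map fun w => (("**" ++ w ++ "**").toList, ("__" ++ w ++ "__").toList))
    ++ [("**all__".toList, "__all__".toList)]

theorem pvPairs_pat_pos : ∀ pr ∈ pvPairs, 0 < pr.1.length := by decide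

-- Source B's single scan: the for/else over the dict at position i is `find?`
def pvOnePass : List Char → List Char
  | [] => []
  | c :: t =>
    match h : pvPairs.find? (fun pr => pr.1.isPrefixOf (c :: t)) with
    | some (p, r) => r ++ pvOnePass ((c :: t).drop p.length)
    | none => c :: pvOnePass t
termination_by l => l.length
decreasing_by
  · have hm := List.mem_of_find?_eq_some h
    have := pvPairs_pat_pos _ hm
    simp [List.length_drop]
    exact this
  · simp

def handle_special_names_py_alt (code : String) : String :=
  String.ofList (pvOnePass code.toList)

-- ===== PRECONDITION & SPEC =====
-- Pre_ excludes strings containing any of these substrings: a placeholder minus its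
-- last one or two characters immediately followed by another placeholder.  On such
-- strings placeholder occurrences overlap or chain, and which one is replaced is an
-- accident of the order of A's nine passes (a corner nobody would specify).
def pvBadSubs : List (List Char) :=
  (pvPairs.flatMap fun p => pvPairs.map fun q => p.1.take (p.1.length - 2) ++ q.1) ++
  (pvPairs.flatMap fun p => pvPairs.map fun q => p.1.take (p.1.length - 1) ++ q.1)

-- does b occur as a contiguous substring of l?
def pvInfix (b : List Char) : List Char → Bool
  | [] => b.isEmpty
  | c :: t => b.isPrefixOf (c :: t) || pvInfix b t

def Pre_handle_special_names_py (code : String) : Prop :=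
  (pvBadSubs.all fun b => !(pvInfix b code.toList)) = true
instance (code : String) : Decidable (Pre_handle_special_names_py code) := by
  unfold Pre_handle_special_names_py; infer_instance

def pvWitness_handle_special_names_py : String := "x = **name**"

def Spec_handle_special_names_py (code : String) (out : String) : Prop := out = handle_special_names_py_alt code
instance (code : String) (out : String) : Decidable (Spec_handle_special_names_py code out) := by unfold Spec_handle_special_names_py; infer_instance

-- ===== CLAIM (what is proved, stated in full; the proofs are below) =====
def Claim_equal_handle_special_names_py : Prop := ∀ (code : String), Dom_handle_special_names_py code → Pre_handle_special_names_py code → Spec_handle_special_names_py code (handle_special_names_py code)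

-- ===== LEMMAS AND PROOFS =====

-- "no bad substring occurs" as a single predicate
def PvBad (l : List Char) : Prop := ∃ b ∈ pvBadSubs, b <:+: l

-- CPython's replace loop as a structural scanner (proof-side model of A's passes)
def pvScan (pat rep : List Char) : List Char → List Char
  | [] => []
  | c :: t =>
    if pat.isPrefixOf (c :: t) then
      rep ++ pvScan pat rep (t.drop (pat.length - 1))
    else
      c :: pvScan pat rep t
termination_by l => l.length
decreasing_by
  · simp
  · simp

-- A's pass loop over the pairs
def pvGoC : List (List Char × List Char) → List Char → List Char
  | [], t => t
  | (p, r) :: ps, t => pvGoC ps (pvScan p r t)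

-- X arises from t by replacing some disjoint placeholder occurrences
inductive PvMix : List Char → List Char → Prop
  | nil : PvMix [] []
  | cons (c : Char) {t X : List Char} : PvMix t X → PvMix (c :: t) (c :: X)
  | block {p r t X : List Char} : (p, r) ∈ pvPairs → PvMix t X → PvMix (p ++ t) (r ++ X)

theorem pvMix_refl : ∀ l : List Char, PvMix l l := by
  intro l; induction l with
  | nil => exact PvMix.nil
  | cons c t ih => exact PvMix.cons c ih

-- facts about the nine concrete pairs, by computation
theorem pv_pat_star : ∀ pr ∈ pvPairs, pr.1.head? = some '*' := by decide
theorem pv_rep_nostar : ∀ pr ∈ pvPairs, '*' ∉ pr.2 := by decide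
theorem pv_rep_ne : ∀ pr ∈ pvPairs, pr.2 ≠ [] := by decide
-- a placeholder's '_' positions: the partial-match-into-a-replacement cases are bad
theorem pvD3 : ∀ pr ∈ pvPairs, ∀ k ∈ List.range 16, ∀ qr ∈ pvPairs,
    (pr.1.drop k).head? = some '_' → (pr.1.take k ++ qr.1) ∈ pvBadSubs := by decide
-- a placeholder matching properly inside another placeholder's text is bad
set_option maxRecDepth 20000 in
theorem pvD1 : ∀ qr ∈ pvPairs, ∀ pr ∈ pvPairs, ∀ j ∈ List.range 16, 1 ≤ j → j < qr.1.length →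
    ((qr.1.drop j <+: pr.1) ∨ (pr.1 <+: qr.1.drop j)) →
    ∃ b ∈ pvBadSubs, b <+: (qr.1.take j ++ pr.1) := by decide

theorem pvBad_of_drop {l : List Char} (n : Nat) (h : PvBad (l.drop n)) : PvBad l := by
  obtain ⟨b, hb, hinf⟩ := h
  exact ⟨b, hb, hinf.trans (List.drop_suffix n l).isInfix⟩

theorem pvBad_of_tail {c : Char} {t : List Char} (h : PvBad t) : PvBad (c :: t) := by
  simpa using pvBad_of_drop (l := c :: t) 1 h

theorem pvInfix_iff (b l : List Char) : pvInfix b l = true ↔ b <:+: l := by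
  induction l with
  | nil => simp [pvInfix, List.isEmpty_iff]
  | cons c t ih =>
    simp [pvInfix, Bool.or_eq_true, List.isPrefixOf_iff_prefix, ih, List.infix_cons_iff]

theorem pv_prefix_split {a b c : List Char} (h : a <+: b ++ c) : a <+: b ∨ b <+: a := by
  induction b generalizing a with
  | nil => exact Or.inr (List.nil_prefix)
  | cons x b' ih =>
    cases a with
    | nil => exact Or.inl (List.nil_prefix)
    | cons y a' =>
      rw [List.cons_append, List.cons_prefix_cons] at h
      obtain ⟨rfl, h2⟩ := h
      rcases ih h2 with h3 | h3
      · exact Or.inl (List.cons_prefix_cons.mpr ⟨rfl, h3⟩)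
      · exact Or.inr (List.cons_prefix_cons.mpr ⟨rfl, h3⟩)

theorem pv_rep_head : ∀ pr ∈ pvPairs, pr.2.head? = some '_' := by decide
theorem pv_len15 : ∀ pr ∈ pvPairs, pr.1.length ≤ 15 := by decide

theorem pv_take_succ {p : List Char} {k : Nat} (hk : k < p.length) :
    p.take (k + 1) = p.take k ++ [p[k]] := by
  rw [List.take_add_one, List.getElem?_eq_getElem hk]; rfl

-- CRUX: a placeholder matching in a mix either matches the original or exposes a bad substring
theorem pvCrux {t X : List Char} (hmix : PvMix t X) :
    ∀ p r, (p, r) ∈ pvPairs → ∀ k, k < p.length → (p.drop k) <+: X →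
      (∃ b ∈ pvBadSubs, b <+: (p.take k ++ t)) ∨
      ((p.drop k) <+: t ∧ PvMix (t.drop (p.length - k)) (X.drop (p.length - k))) := by
  induction hmix with
  | nil =>
    intro p r hpr k hk hp
    exfalso
    have := hp.length_le
    simp at this
    omega
  | cons c hm ih =>
    rename_i t' X'
    intro p r hpr k hk hp
    rw [List.drop_eq_getElem_cons hk] at hp
    obtain ⟨hck, htail⟩ := List.cons_prefix_cons.mp hp
    by_cases hlast : k + 1 < p.length
    · rcases ih p r hpr (k + 1) hlast htail with ⟨b, hb, hbp⟩ | ⟨h1, h2⟩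
      · left
        refine ⟨b, hb, ?_⟩
        rw [pv_take_succ hk, hck] at hbp
        simpa using hbp
      · right
        constructor
        · rw [List.drop_eq_getElem_cons hk, hck]
          exact List.cons_prefix_cons.mpr ⟨rfl, h1⟩
        · have he : p.length - k = (p.length - (k + 1)) + 1 := by omega
          rw [he]
          simpa using h2
    · have hnil : p.drop (k + 1) = [] := by
        have : p.length ≤ k + 1 := by omega
        simp [List.drop_eq_nil_iff, this]
      right
      constructor
      · rw [List.drop_eq_getElem_cons hk, hck, hnil]
        exact List.cons_prefix_cons.mpr ⟨rfl, List.nil_prefix⟩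
      · have he : p.length - k = 1 := by omega
        rw [he]
        simpa using hm
  | block hq hm ih =>
    rename_i q rq t' X'
    intro p r hpr k hk hp
    left
    have hrq := pv_rep_head _ hq
    obtain ⟨d, rq', rfl⟩ : ∃ d rq', rq = d :: rq' := by
      cases rq with
      | nil => simp at hrq
      | cons d rq' => exact ⟨d, rq', rfl⟩
    have hd : d = '_' := by simpa using hrq
    rw [List.drop_eq_getElem_cons hk] at hp
    obtain ⟨hck, -⟩ := List.cons_prefix_cons.mp hp
    have hhead : (p.drop k).head? = some '_' := by
      rw [List.drop_eq_getElem_cons hk]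
      simp [hck, hd]
    have hmem := pvD3 (p, r) hpr k (by
        have h15 : p.length ≤ 15 := by simpa using pv_len15 _ hpr
        simp only [List.mem_range]
        omega) (q, d :: rq') hq hhead
    exact ⟨_, hmem, ⟨t', by simp⟩⟩

-- scanning passes over a segment it can never match in
theorem pvScan_skip (p r : List Char) :
    ∀ u Y, (∀ j, j < u.length → ¬ (p <+: (u.drop j ++ Y))) →
      pvScan p r (u ++ Y) = u ++ pvScan p r Y := by
  intro u
  induction u with
  | nil => intro Y _; simp
  | cons x u' ih =>
    intro Y h
    have h0 : ¬ p <+: (x :: (u' ++ Y)) := by simpa using h 0 (by simp)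
    have hb : ¬ p.isPrefixOf (x :: (u' ++ Y)) = true := by
      rw [List.isPrefixOf_iff_prefix]; exact h0
    rw [List.cons_append, pvScan, if_neg hb, ih Y (fun j hj => by simpa using h (j + 1) (by simp; omega))]
    simp

-- one replace pass preserves the mix relation
theorem pvScan_mix (p r : List Char) (hpr : (p, r) ∈ pvPairs) :
    ∀ n X t, X.length ≤ n → ¬ PvBad t → PvMix t X → PvMix t (pvScan p r X) := by
  intro n
  induction n with
  | zero =>
    intro X t hlen hb hmix
    cases hmix with
    | nil => simpa [pvScan] using PvMix.nil
    | cons c hm => simp at hlen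
    | block hq hm =>
      exfalso
      rename_i q rq t' X'
      have hne : rq ≠ [] := by simpa using pv_rep_ne _ hq
      rw [Nat.le_zero, List.length_append] at hlen
      exact hne (List.eq_nil_of_length_eq_zero (by omega))
  | succ n ih =>
    intro X t hlen hb hmix
    cases hmix with
    | nil => simpa [pvScan] using PvMix.nil
    | cons c hm =>
      rename_i t' X'
      by_cases hpre : p.isPrefixOf (c :: X') = true
      · rw [pvScan, if_pos hpre]
        have hplen : 0 < p.length := pvPairs_pat_pos _ hpr
        have hp0 : p.drop 0 <+: (c :: X') := by
          simpa using List.isPrefixOf_iff_prefix.mp hpre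
        rcases pvCrux (PvMix.cons c hm) p r hpr 0 hplen hp0 with ⟨b, hb2, hbp⟩ | ⟨h1, h2⟩
        · exact absurd ⟨b, hb2, (by simpa using hbp : b <+: (c :: t')).isInfix⟩ hb
        · simp only [List.drop_zero, Nat.sub_zero] at h1 h2
          have hdec : (c :: t') = p ++ (c :: t').drop p.length := by
            obtain ⟨s, hs⟩ := h1
            rw [← hs]; simp
          obtain ⟨m, hm2⟩ : ∃ m, p.length = m + 1 := ⟨p.length - 1, by omega⟩
          have hX : (c :: X').drop p.length = X'.drop (p.length - 1) := by
            rw [hm2]; simp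
          rw [hX] at h2
          rw [hdec]
          refine PvMix.block hpr (ih (X'.drop (p.length - 1)) ((c :: t').drop p.length) ?_ ?_ h2)
          · have : X'.length ≤ n := by simpa using hlen
            simp [List.length_drop]
            omega
          · exact fun hbad => hb (pvBad_of_drop p.length hbad)
      · rw [pvScan, if_neg hpre]
        exact PvMix.cons c (ih X' t' (by simpa using hlen) (fun h => hb (pvBad_of_tail h)) hm)
    | block hq hm =>
      rename_i q rq t' X'
      have hstar := pv_pat_star _ hpr
      obtain ⟨p0, p', rfl⟩ : ∃ p0 p', p = p0 :: p' := by
        cases p with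
        | nil => simp at hstar
        | cons p0 p' => exact ⟨p0, p', rfl⟩
      have hp0 : p0 = '*' := by simpa using hstar
      have hnostar := pv_rep_nostar _ hq
      have hskip : pvScan (p0 :: p') r (rq ++ X') = rq ++ pvScan (p0 :: p') r X' := by
        apply pvScan_skip
        intro j hj hcontra
        rw [List.drop_eq_getElem_cons hj, List.cons_append] at hcontra
        obtain ⟨heq, -⟩ := List.cons_prefix_cons.mp hcontra
        exact hnostar (by rw [hp0] at heq; rw [heq]; exact List.getElem_mem hj)
      rw [hskip]
      have hb' : ¬ PvBad t' := by
        intro h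
        exact hb (pvBad_of_drop q.length (by simpa using h))
      refine PvMix.block hq (ih X' t' ?_ hb' hm)
      have hrq : rq ≠ [] := by simpa using pv_rep_ne _ hq
      have : 0 < rq.length := List.length_pos_iff.mpr hrq
      simp at hlen
      omega

-- the scanner agrees with CPython's replace loop (nonempty pattern)
theorem pvGo_eq_replace_aux (old new : List Char) (hold : old ≠ []) :
    ∀ (fuel : Nat) (l acc : List Char), l.length ≤ fuel →
      PySem.Chars.replace.go old new fuel l acc = acc.reverse ++ pvScan old new l := by
  intro fuel
  induction fuel with
  | zero =>
      intro l acc hl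
      have : l = [] := List.eq_nil_of_length_eq_zero (Nat.le_zero.mp hl)
      subst this
      simp [PySem.Chars.replace.go, pvScan]
  | succ n ih =>
      intro l acc hl
      cases l with
      | nil => simp [PySem.Chars.replace.go, pvScan]
      | cons c t =>
          obtain ⟨k, hk⟩ : ∃ k, old.length = k + 1 := by
            cases old with
            | nil => exact absurd rfl hold
            | cons a b => exact ⟨b.length, rfl⟩
          by_cases hp : old.isPrefixOf (c :: t) = true
          · have hdrop : List.drop old.length (c :: t) = t.drop (old.length - 1) := by
              rw [hk]; simp
            have hlen : (List.drop (old.length - 1) t).length ≤ n := by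
              simp at hl ⊢; omega
            rw [PySem.Chars.replace.go, if_pos hp, hdrop, ih _ _ hlen, pvScan, if_pos hp]
            simp
          · have hlen : t.length ≤ n := by simp at hl; omega
            rw [PySem.Chars.replace.go, if_neg hp, ih _ _ hlen, pvScan, if_neg hp]
            simp

theorem replace_eq_pvScan (s old new : List Char) (hold : old ≠ []) :
    PySem.Chars.replace s old new = pvScan old new s := by
  rw [PySem.Chars.replace, if_neg (by simpa [List.isEmpty_iff] using hold)]
  simpa using pvGo_eq_replace_aux old new hold s.length s [] (le_refl _)

theorem foldl_replace_eq_goC : ∀ (ps : List (String × String)) (s : String),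
    (∀ p ∈ ps, p.1.toList ≠ []) →
    List.foldl (fun c pr => PySem.Str.replace c pr.1 pr.2) s ps
      = String.ofList (pvGoC (ps.map fun pr => (pr.1.toList, pr.2.toList)) s.toList) := by
  intro ps
  induction ps with
  | nil => intro s _; simp [pvGoC]
  | cons p ps ih =>
      intro s hne
      have h1 : (PySem.Str.replace s p.1 p.2).toList
          = pvScan p.1.toList p.2.toList s.toList := by
        rw [PySem.Str.toList_replace, replace_eq_pvScan _ _ _ (hne p (by simp))]
      calc List.foldl (fun c pr => PySem.Str.replace c pr.1 pr.2) s (p :: ps)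
          = List.foldl (fun c pr => PySem.Str.replace c pr.1 pr.2)
              (PySem.Str.replace s p.1 p.2) ps := by simp
        _ = String.ofList (pvGoC (ps.map fun pr => (pr.1.toList, pr.2.toList))
              (PySem.Str.replace s p.1 p.2).toList) :=
              ih _ (fun q hq => hne q (by simp [hq]))
        _ = String.ofList (pvGoC ((p :: ps).map fun pr => (pr.1.toList, pr.2.toList)) s.toList) := by
              rw [h1]; cases p with | mk a b => rfl

-- the bridge: A's fold of replaces = pvGoC (reusing the replace characterisation)
theorem pvA_eq_goC (code : String) :
    handle_special_names_py code = String.ofList (pvGoC pvPairs code.toList) := by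
  have hitems : pvReplacementsA.items.map (fun pr => (pr.1.toList, pr.2.toList)) = pvPairs := by
    decide
  unfold handle_special_names_py
  rw [foldl_replace_eq_goC _ _ (by decide), hitems]

theorem pvMix_append_left (u : List Char) {t X : List Char} (h : PvMix t X) :
    PvMix (u ++ t) (u ++ X) := by
  induction u with
  | nil => simpa using h
  | cons c u' ih => exact PvMix.cons c ih

theorem pvGoC_nil : ∀ ps, pvGoC ps [] = [] := by
  intro ps
  induction ps with
  | nil => rfl
  | cons pr ps ih =>
    obtain ⟨p, r⟩ := pr
    show pvGoC ps (pvScan p r []) = []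
    rw [pvScan]
    exact ih

-- passes leave a character alone when no placeholder matches there
theorem pvGo_cons (c : Char) (t : List Char) (hb : ¬ PvBad (c :: t))
    (hnm : ∀ pr ∈ pvPairs, ¬ (pr.1 <+: (c :: t))) :
    ∀ ps, (∀ x ∈ ps, x ∈ pvPairs) → ∀ X, PvMix t X →
      pvGoC ps (c :: X) = c :: pvGoC ps X := by
  intro ps
  induction ps with
  | nil => intro _ X _; rfl
  | cons pr ps' ih =>
    intro hsub X hmix
    obtain ⟨p, r⟩ := pr
    have hpr : (p, r) ∈ pvPairs := hsub _ (by simp)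
    have hplen : 0 < p.length := pvPairs_pat_pos _ hpr
    have hnp : ¬ p.isPrefixOf (c :: X) = true := by
      rw [List.isPrefixOf_iff_prefix]
      intro hp
      rcases pvCrux (PvMix.cons c hmix) p r hpr 0 hplen (by simpa using hp) with
        ⟨b, hb2, hbp⟩ | ⟨h1, -⟩
      · exact hb ⟨b, hb2, (show b <+: c :: t by simpa using hbp).isInfix⟩
      · exact hnm (p, r) hpr (by simpa using h1)
    show pvGoC ps' (pvScan p r (c :: X)) = c :: pvGoC ps' (pvScan p r X)
    rw [pvScan, if_neg hnp]
    exact ih (fun x hx => hsub x (by simp [hx])) (pvScan p r X)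
      (pvScan_mix p r hpr X.length X t le_rfl (fun h => hb (pvBad_of_tail h)) hmix)

-- passes walk straight through an already-substituted replacement (it has no '*')
theorem pvGo_skip (rq : List Char) (hnostar : '*' ∉ rq) :
    ∀ ps, (∀ x ∈ ps, x ∈ pvPairs) → ∀ t X, ¬ PvBad t → PvMix t X →
      pvGoC ps (rq ++ X) = rq ++ pvGoC ps X := by
  intro ps
  induction ps with
  | nil => intro _ t X _ _; rfl
  | cons pr ps' ih =>
    intro hsub t X hb hmix
    obtain ⟨p, r⟩ := pr
    have hpr : (p, r) ∈ pvPairs := hsub _ (by simp)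
    have hstar := pv_pat_star _ hpr
    obtain ⟨p0, p', rfl⟩ : ∃ p0 p', p = p0 :: p' := by
      cases p with
      | nil => simp at hstar
      | cons p0 p' => exact ⟨p0, p', rfl⟩
    have hp0 : p0 = '*' := by simpa using hstar
    have hskip : pvScan (p0 :: p') r (rq ++ X) = rq ++ pvScan (p0 :: p') r X := by
      apply pvScan_skip
      intro j hj hcontra
      rw [List.drop_eq_getElem_cons hj, List.cons_append] at hcontra
      obtain ⟨heq, -⟩ := List.cons_prefix_cons.mp hcontra
      exact hnostar (by rw [hp0] at heq; rw [heq]; exact List.getElem_mem hj)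
    show pvGoC ps' (pvScan (p0 :: p') r (rq ++ X)) = rq ++ pvGoC ps' (pvScan (p0 :: p') r X)
    rw [hskip]
    exact ih (fun x hx => hsub x (by simp [hx])) t (pvScan (p0 :: p') r X) hb
      (pvScan_mix (p0 :: p') r hpr X.length X t le_rfl hb hmix)

-- the pass loop on a string headed by its first matching placeholder
theorem pvGo_block (q rq rest : List Char) (hb : ¬ PvBad (q ++ rest)) :
    ∀ ps, (∀ x ∈ ps, x ∈ pvPairs) →
      ps.find? (fun pr => pr.1.isPrefixOf (q ++ rest)) = some (q, rq) →
      ∀ X, PvMix rest X → pvGoC ps (q ++ X) = rq ++ pvGoC ps X := by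
  intro ps
  induction ps with
  | nil => intro _ hf _ _; simp at hf
  | cons pr ps' ih =>
    intro hsub hf X hmix
    obtain ⟨p, r⟩ := pr
    have hpr : (p, r) ∈ pvPairs := hsub _ (by simp)
    have hplen : 0 < p.length := pvPairs_pat_pos _ hpr
    have hq : (q, rq) ∈ pvPairs := hsub _ (List.mem_of_find?_eq_some hf)
    have hbrest : ¬ PvBad rest := fun h =>
      hb (pvBad_of_drop q.length (by simpa using h))
    by_cases hpred : p.isPrefixOf (q ++ rest) = true
    · simp only [List.find?_cons, hpred] at hf
      obtain ⟨hpq, hrq⟩ : p = q ∧ r = rq := by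
        have := Option.some.inj hf
        exact ⟨congrArg Prod.fst this, congrArg Prod.snd this⟩
      show pvGoC ps' (pvScan p r (q ++ X)) = rq ++ pvGoC ps' (pvScan p r X)
      rw [hpq, hrq]
      have hqlen : 0 < q.length := pvPairs_pat_pos _ hq
      have hhead : pvScan q rq (q ++ X) = rq ++ pvScan q rq X := by
        obtain ⟨q0, q', rfl⟩ : ∃ q0 q', q = q0 :: q' := by
          cases q with
          | nil => simp at hqlen
          | cons q0 q' => exact ⟨q0, q', rfl⟩
        rw [List.cons_append, pvScan,
          if_pos (List.isPrefixOf_iff_prefix.mpr (by exact ⟨X, by simp⟩))]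
        congr 1
        congr 1
        simp
      rw [hhead]
      exact pvGo_skip rq (pv_rep_nostar _ hq) ps' (fun x hx => hsub x (by simp [hx]))
        rest (pvScan q rq X) hbrest
        (pvScan_mix q rq hq X.length X rest le_rfl hbrest hmix)
    · have hpred' : p.isPrefixOf (q ++ rest) = false := by
        cases hpb : p.isPrefixOf (q ++ rest)
        · rfl
        · exact absurd hpb hpred
      simp only [List.find?_cons, hpred'] at hf
      show pvGoC ps' (pvScan p r (q ++ X)) = rq ++ pvGoC ps' (pvScan p r X)
      have hq15 : q.length ≤ 15 := by simpa using pv_len15 _ hq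
      have hskip : pvScan p r (q ++ X) = q ++ pvScan p r X := by
        apply pvScan_skip
        intro j hj hcontra
        have hmx : PvMix (q.drop j ++ rest) (q.drop j ++ X) := pvMix_append_left _ hmix
        have hbj : ¬ PvBad (q.drop j ++ rest) := by
          intro hbad
          refine hb (pvBad_of_drop j ?_)
          rwa [List.drop_append_of_le_length (Nat.le_of_lt hj)]
        rcases pvCrux hmx p r hpr 0 hplen (by simpa using hcontra) with
          ⟨b, hb2, hbp⟩ | ⟨h1, -⟩
        · exact hbj ⟨b, hb2, (show b <+: q.drop j ++ rest by simpa using hbp).isInfix⟩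
        · simp only [List.drop_zero] at h1
          rcases Nat.eq_zero_or_pos j with rfl | hjpos
          · simp only [List.drop_zero] at h1
            exact hpred (List.isPrefixOf_iff_prefix.mpr h1)
          · obtain ⟨b, hb2, hbp⟩ := pvD1 (q, rq) hq (p, r) hpr j
              (by simp only [List.mem_range]; omega) hjpos hj
              ((pv_prefix_split h1).symm.imp id id)
            refine hb ⟨b, hb2, ?_⟩
            refine List.IsPrefix.isInfix ?_
            calc b <+: q.take j ++ p := hbp
              _ <+: q.take j ++ (q.drop j ++ rest) := by
                  obtain ⟨s2, hs2⟩ := h1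
                  exact ⟨s2, by rw [List.append_assoc, hs2]⟩
              _ = q ++ rest := by rw [← List.append_assoc, List.take_append_drop]
      rw [hskip]
      exact ih (fun x hx => hsub x (by simp [hx])) hf (pvScan p r X)
        (pvScan_mix p r hpr X.length X rest le_rfl hbrest hmix)

-- main: under Pre_, the nine passes equal the single scan
theorem pvMain : ∀ n l, l.length ≤ n → ¬ PvBad l → pvGoC pvPairs l = pvOnePass l := by
  intro n
  induction n with
  | zero =>
    intro l hl _
    have : l = [] := List.eq_nil_of_length_eq_zero (Nat.le_zero.mp hl)
    subst this
    rw [pvGoC_nil, pvOnePass]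
  | succ n ih =>
    intro l hl hb
    cases l with
    | nil => rw [pvGoC_nil, pvOnePass]
    | cons c t =>
      match hfind : pvPairs.find? (fun pr => pr.1.isPrefixOf (c :: t)) with
      | none =>
        have hnm : ∀ pr ∈ pvPairs, ¬ (pr.1 <+: (c :: t)) := by
          intro pr hpr hp
          exact (List.find?_eq_none.mp hfind pr hpr)
            (List.isPrefixOf_iff_prefix.mpr hp)
        rw [pvGo_cons c t hb hnm pvPairs (fun x hx => hx) t (pvMix_refl t)]
        rw [pvOnePass, hfind]
        exact congrArg _ (ih t (by simpa using hl) (fun h => hb (pvBad_of_tail h)))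
      | some (q, rq) =>
        have hq : (q, rq) ∈ pvPairs := List.mem_of_find?_eq_some hfind
        have hqlen : 0 < q.length := pvPairs_pat_pos _ hq
        have hqp : q <+: (c :: t) :=
          List.isPrefixOf_iff_prefix.mp (by simpa using List.find?_some hfind)
        have hdec : (c :: t) = q ++ (c :: t).drop q.length := by
          obtain ⟨s, hs⟩ := hqp
          rw [← hs]; simp
        have hbrest : ¬ PvBad ((c :: t).drop q.length) := fun h =>
          hb (pvBad_of_drop q.length h)
        have hEq : pvGoC pvPairs (c :: t) = rq ++ pvGoC pvPairs ((c :: t).drop q.length) := by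
          conv_lhs => rw [hdec]
          exact pvGo_block q rq ((c :: t).drop q.length)
            (hdec ▸ hb) pvPairs (fun x hx => hx) (hdec ▸ hfind)
            ((c :: t).drop q.length) (pvMix_refl _)
        rw [hEq, pvOnePass, hfind]
        exact congrArg _ (ih ((c :: t).drop q.length)
          (by simp at hl ⊢; omega) hbrest)

-- ===== VERDICT (by name: the statement is the Claim_ definition above) =====
theorem handle_special_names_py_spec : Claim_equal_handle_special_names_py := by
  intro code _ hpre
  unfold Spec_handle_special_names_py handle_special_names_py_alt
  rw [pvA_eq_goC]
  have hnb : ¬ PvBad code.toList := by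
    rintro ⟨b, hb, hinf⟩
    have h2 := (List.all_eq_true.mp hpre) b hb
    simp only [Bool.not_eq_true'] at h2
    exact absurd ((pvInfix_iff b code.toList).mpr hinf) (by simp [h2])
  rw [pvMain code.toList.length code.toList le_rfl hnb]
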